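-- pv_equiv track=rewrite | github.com/DianaLeoTang/PGENSCORE5-Data-Clean | data_analysis_and_visualization.py | categorize_pgs
-- ===== SOURCE A (Python) =====
-- def categorize_pgs(columns):
--     """将PGS变量按类别分组"""
--     categories = {
--         '认知能力': ['GENCOG', 'EDU'],
--         '身体特征': ['BMI', 'HEIGHT', 'WC', 'WHR'],
--         '精神健康': ['SCZ', 'MDD', 'BIP', 'ADHD', 'AUTISM', 'OCD', 'PTSD', 'ANX', 'NEUROTICISM', 'DEPSYMP', 'WELLBEING', 'EXTRAVERSION', 'XDISORDER'],
--         '心血管疾病': ['CAD', 'MI', 'HTN', 'SBP', 'DBP', 'PP'],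
--         '代谢疾病': ['T2D', 'HBA1C', 'HDL', 'LDL', 'TC', 'TG'],
--         '神经退行性疾病': ['AD', 'ALZ', 'PROXYALZ'],
--         '肾脏疾病': ['CKD', 'BUN', 'EGFR'],
--         '行为特征': ['EVRSMK', 'CPD', 'SC', 'SI', 'AI', 'DPW', 'ALC', 'CANNABIS', 'AB'],
--         '生殖健康': ['MENARCHE', 'MENOPAUSE', 'AFB', 'NEB'],
--         '其他': ['LONGEVITY', 'CORTISOL', 'CRP']
--     }
--
--     categorized = {cat: [] for cat in categories.keys()}
--     categorized['其他'] = []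
--
--     for col in columns:
--         assigned = False
--         for category, keywords in categories.items():
--             if any(keyword in col for keyword in keywords):
--                 categorized[category].append(col)
--                 assigned = True
--                 break
--         if not assigned:
--             categorized['其他'].append(col)
--
--     return categorized
-- ===== SOURCE B (Python) =====
-- # Two-stage: classify each column by the first matching (keyword, category) pair
-- # in a flattened category-major table, then build each bucket with a filter.
-- _PAIRS = [(kw, cat) for cat, kws in [
--     ('认知能力', ['GENCOG', 'EDU']),
--     ('身体特征', ['BMI', 'HEIGHT', 'WC', 'WHR']),
--     ('精神健康', ['SCZ', 'MDD', 'BIP', 'ADHD', 'AUTISM', 'OCD', 'PTSD', 'ANX', 'NEUROTICISM', 'DEPSYMP', 'WELLBEING', 'EXTRAVERSION', 'XDISORDER']),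
--     ('心血管疾病', ['CAD', 'MI', 'HTN', 'SBP', 'DBP', 'PP']),
--     ('代谢疾病', ['T2D', 'HBA1C', 'HDL', 'LDL', 'TC', 'TG']),
--     ('神经退行性疾病', ['AD', 'ALZ', 'PROXYALZ']),
--     ('肾脏疾病', ['CKD', 'BUN', 'EGFR']),
--     ('行为特征', ['EVRSMK', 'CPD', 'SC', 'SI', 'AI', 'DPW', 'ALC', 'CANNABIS', 'AB']),
--     ('生殖健康', ['MENARCHE', 'MENOPAUSE', 'AFB', 'NEB']),
--     ('其他', ['LONGEVITY', 'CORTISOL', 'CRP']),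
-- ] for kw in kws]
--
-- _NAMES = ['认知能力', '身体特征', '精神健康', '心血管疾病', '代谢疾病',
--           '神经退行性疾病', '肾脏疾病', '行为特征', '生殖健康', '其他']
--
--
-- def _dest(col):
--     return next((cat for kw, cat in _PAIRS if kw in col), '其他')
--
--
-- def categorize_pgs(columns):
--     """将PGS变量按类别分组"""
--     return {cat: [col for col in columns if _dest(col) == cat] for cat in _NAMES}
-- ===== Notes on version B (the rewrite author's own statement) =====
-- stated objective: simpler
-- what changed: A mutates a dict, appending each column to the bucket found by scanning categories with an any-keyword test and a break; B is a two-stage functional rewrite: a flattened (keyword, category) pair list classifies each column via first-matching-pair, and the result is built at once as a per-category filter comprehension with no mutation, no append and no break flag.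
import Mathlib
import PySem

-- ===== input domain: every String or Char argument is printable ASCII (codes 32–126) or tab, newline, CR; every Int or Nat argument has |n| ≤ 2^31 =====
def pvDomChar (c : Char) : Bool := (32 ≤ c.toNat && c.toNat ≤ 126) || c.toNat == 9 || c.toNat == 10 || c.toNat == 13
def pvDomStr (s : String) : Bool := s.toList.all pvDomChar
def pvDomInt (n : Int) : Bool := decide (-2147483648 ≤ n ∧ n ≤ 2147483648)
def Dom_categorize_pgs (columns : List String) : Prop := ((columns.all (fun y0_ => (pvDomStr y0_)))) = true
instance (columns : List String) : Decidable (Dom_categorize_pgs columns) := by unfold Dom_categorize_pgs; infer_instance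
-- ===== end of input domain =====

-- B replaces A's mutate-a-dict, append-per-column loop by a two-stage functional build:
-- classify each column by the first matching (keyword, category) pair in a flattened table,
-- then produce every bucket at once as a per-category filter (objective: simpler).

-- ===== PORT A =====
-- A's literal category table (dict in insertion order)
def pvCats : List (String × List String) :=
  [("认知能力", ["GENCOG", "EDU"]),
   ("身体特征", ["BMI", "HEIGHT", "WC", "WHR"]),
   ("精神健康", ["SCZ", "MDD", "BIP", "ADHD", "AUTISM", "OCD", "PTSD", "ANX", "NEUROTICISM", "DEPSYMP", "WELLBEING", "EXTRAVERSION", "XDISORDER"]),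
   ("心血管疾病", ["CAD", "MI", "HTN", "SBP", "DBP", "PP"]),
   ("代谢疾病", ["T2D", "HBA1C", "HDL", "LDL", "TC", "TG"]),
   ("神经退行性疾病", ["AD", "ALZ", "PROXYALZ"]),
   ("肾脏疾病", ["CKD", "BUN", "EGFR"]),
   ("行为特征", ["EVRSMK", "CPD", "SC", "SI", "AI", "DPW", "ALC", "CANNABIS", "AB"]),
   ("生殖健康", ["MENARCHE", "MENOPAUSE", "AFB", "NEB"]),
   ("其他", ["LONGEVITY", "CORTISOL", "CRP"])]

-- any(keyword in col for keyword in keywords)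
def pvMatch (kws : List String) (col : String) : Bool := kws.any (fun k => PySem.Str.isIn k col)

-- A's inner 'for category, keywords in categories.items(): … break' loop: the first matching category
def pvFirst : List (String × List String) → String → Option String
  | [], _ => none
  | (cat, kws) :: rest, col => if pvMatch kws col then some cat else pvFirst rest col

def categorize_pgs (columns : List String) : List (String × List String) :=
  let categories : PySem.Dict String (List String) := PySem.Dict.ofList pvCats
  let categorized : PySem.Dict String (List String) :=
    categories.keys.foldl (fun d c => d.insert c ([] : List String)) PySem.Dict.empty
  let categorized := categorized.insert "其他" ([] : List String)
  let categorized := columns.foldl (fun d col =>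
      match pvFirst categories.items col with
      | some cat => d.modify cat [] (· ++ [col])
      | none     => d.modify "其他" [] (· ++ [col])) categorized
  categorized.items

-- ===== PORT B =====
-- Source B's _PAIRS: the flattened category-major (keyword, category) list
def pvPairs : List (String × String) :=
  [("GENCOG", "认知能力"), ("EDU", "认知能力"),
   ("BMI", "身体特征"), ("HEIGHT", "身体特征"), ("WC", "身体特征"), ("WHR", "身体特征"),
   ("SCZ", "精神健康"), ("MDD", "精神健康"), ("BIP", "精神健康"), ("ADHD", "精神健康"),
   ("AUTISM", "精神健康"), ("OCD", "精神健康"), ("PTSD", "精神健康"), ("ANX", "精神健康"),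
   ("NEUROTICISM", "精神健康"), ("DEPSYMP", "精神健康"), ("WELLBEING", "精神健康"),
   ("EXTRAVERSION", "精神健康"), ("XDISORDER", "精神健康"),
   ("CAD", "心血管疾病"), ("MI", "心血管疾病"), ("HTN", "心血管疾病"),
   ("SBP", "心血管疾病"), ("DBP", "心血管疾病"), ("PP", "心血管疾病"),
   ("T2D", "代谢疾病"), ("HBA1C", "代谢疾病"), ("HDL", "代谢疾病"),
   ("LDL", "代谢疾病"), ("TC", "代谢疾病"), ("TG", "代谢疾病"),
   ("AD", "神经退行性疾病"), ("ALZ", "神经退行性疾病"), ("PROXYALZ", "神经退行性疾病"),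
   ("CKD", "肾脏疾病"), ("BUN", "肾脏疾病"), ("EGFR", "肾脏疾病"),
   ("EVRSMK", "行为特征"), ("CPD", "行为特征"), ("SC", "行为特征"), ("SI", "行为特征"),
   ("AI", "行为特征"), ("DPW", "行为特征"), ("ALC", "行为特征"),
   ("CANNABIS", "行为特征"), ("AB", "行为特征"),
   ("MENARCHE", "生殖健康"), ("MENOPAUSE", "生殖健康"), ("AFB", "生殖健康"), ("NEB", "生殖健康"),
   ("LONGEVITY", "其他"), ("CORTISOL", "其他"), ("CRP", "其他")]

-- Source B's _NAMES
def pvNamesB : List String :=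
  ["认知能力", "身体特征", "精神健康", "心血管疾病", "代谢疾病",
   "神经退行性疾病", "肾脏疾病", "行为特征", "生殖健康", "其他"]

-- _dest: next((cat for kw, cat in _PAIRS if kw in col), '其他')
def pvDestB (col : String) : String :=
  ((pvPairs.find? (fun q => PySem.Str.isIn q.1 col)).map Prod.snd).getD "其他"

def categorize_pgs_alt (columns : List String) : List (String × List String) :=
  pvNamesB.map (fun cat => (cat, columns.filter (fun col => pvDestB col == cat)))

-- ===== PRECONDITION & SPEC =====
def Spec_categorize_pgs (columns : List String) (out : List (String × List String)) : Prop := out = categorize_pgs_alt columns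
instance (columns : List String) (out : List (String × List String)) : Decidable (Spec_categorize_pgs columns out) := by unfold Spec_categorize_pgs; infer_instance

-- ===== CLAIM (what is proved, stated in full; the proofs are below) =====
def Claim_equal_categorize_pgs : Prop := ∀ (columns : List String), Dom_categorize_pgs columns → Spec_categorize_pgs columns (categorize_pgs columns)

-- ===== LEMMAS AND PROOFS =====
def pvNames : List String :=
  ["认知能力", "身体特征", "精神健康", "心血管疾病", "代谢疾病",
   "神经退行性疾病", "肾脏疾病", "行为特征", "生殖健康", "其他"]

def pvDest (col : String) : String := (pvFirst pvCats col).getD "其他"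

def pvSkel (P : String → List String) : PySem.Dict String (List String) :=
  ⟨pvNames.map (fun c => (c, P c))⟩

lemma pvFirst_mem {L : List (String × List String)} {col c : String}
    (h : pvFirst L col = some c) : c ∈ L.map Prod.fst := by
  induction L with
  | nil => simp [pvFirst] at h
  | cons p rest ih =>
    obtain ⟨cat, kws⟩ := p
    simp only [pvFirst] at h
    by_cases hm : pvMatch kws col = true <;> simp [hm] at h
    · simp [h.symm]
    · exact List.mem_cons_of_mem _ (ih h)

lemma pvSkel_contains {c : String} (hc : c ∈ pvNames) (P : String → List String) :
    (pvSkel P).contains c = true := by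
  fin_cases hc <;> simp [pvSkel, pvNames, PySem.Dict.contains]

lemma pvSkel_getD {c : String} (hc : c ∈ pvNames) (P : String → List String) :
    (pvSkel P).getD c [] = P c := by
  fin_cases hc <;> simp [pvSkel, pvNames, PySem.Dict.getD, PySem.Dict.get?]

lemma pvSkel_modify {c0 : String} (hc : c0 ∈ pvNames) (P : String → List String)
    (g : List String → List String) :
    (pvSkel P).modify c0 [] g = pvSkel (fun c => if c = c0 then g (P c) else P c) := by
  have hgd := pvSkel_getD hc P
  rw [PySem.Dict.modify, hgd]
  apply PySem.Dict.ext
  rw [PySem.Dict.items_insert_of_contains _ _ (pvSkel_contains hc P)]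
  fin_cases hc <;> simp [pvSkel, pvNames]

lemma pvSkel_congr {P Q : String → List String} (h : ∀ c ∈ pvNames, P c = Q c) :
    pvSkel P = pvSkel Q := by
  unfold pvSkel
  congr 1
  exact List.map_congr_left (fun c hc => by rw [h c hc])

-- A's loop characterised: each bucket ends up with the columns whose first-matching category is it
lemma pvALoop (columns : List String) (P : String → List String) :
    columns.foldl (fun d col =>
      match pvFirst (PySem.Dict.ofList pvCats).items col with
      | some cat => d.modify cat [] (· ++ [col])
      | none     => d.modify "其他" [] (· ++ [col])) (pvSkel P)
    = pvSkel (fun c => P c ++ columns.filter (fun col => pvDest col == c)) := by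
  have hitems : (PySem.Dict.ofList pvCats).items = pvCats := by decide
  induction columns generalizing P with
  | nil =>
    rw [List.foldl_nil]
    exact pvSkel_congr (fun c _ => by simp)
  | cons x xs ih =>
    rw [List.foldl_cons]
    rcases hfx : pvFirst (PySem.Dict.ofList pvCats).items x with _ | cat
    · rw [hitems] at hfx
      have hd : pvDest x = "其他" := by simp [pvDest, hfx]
      have hm : "其他" ∈ pvNames := by simp [pvNames]
      dsimp only
      rw [pvSkel_modify hm, ih]
      apply pvSkel_congr
      intro c _
      rw [List.filter_cons]
      by_cases hc : c = "其他"
      · subst hc; simp [hd, List.append_assoc]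
      · have hne : (pvDest x == c) = false := by
          simp only [beq_eq_false_iff_ne, hd]; exact fun h => hc h.symm
        simp [hne, hc]
    · rw [hitems] at hfx
      have hd : pvDest x = cat := by simp [pvDest, hfx]
      have hm : cat ∈ pvNames := by
        have := pvFirst_mem hfx; simpa [pvCats, pvNames] using this
      dsimp only
      rw [pvSkel_modify hm, ih]
      apply pvSkel_congr
      intro c _
      rw [List.filter_cons]
      by_cases hc : c = cat
      · subst hc; simp [hd, List.append_assoc]
      · have hne : (pvDest x == c) = false := by
          simp only [beq_eq_false_iff_ne, hd]; exact fun h => hc h.symm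
        simp [hne, hc]

-- flattening one category's keyword block of the pair list
lemma pvFlat_block (kws : List String) (cat col : String) (R : List (String × String)) :
    ((kws.map (fun k => (k, cat)) ++ R).find? (fun q => PySem.Str.isIn q.1 col)).map Prod.snd
    = if pvMatch kws col then some cat else (R.find? (fun q => PySem.Str.isIn q.1 col)).map Prod.snd := by
  induction kws with
  | nil => simp [pvMatch]
  | cons k kws ih =>
    rw [List.map_cons, List.cons_append]
    by_cases hk : PySem.Str.isIn k col = true
    · have hm : pvMatch (k :: kws) col = true := by simp [pvMatch, PySem.Str.isIn] at hk ⊢; exact Or.inl hk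
      rw [List.find?_cons_of_pos (by simpa using hk), hm, if_pos rfl]
      rfl
    · have hm : pvMatch (k :: kws) col = pvMatch kws col := by
        simp only [pvMatch, List.any_cons]
        simp [PySem.Str.isIn] at hk
        simp [PySem.Str.isIn, hk]
      rw [List.find?_cons_of_neg (by simpa using hk), ih, hm]

-- first-matching category (A) = category of the first matching flattened pair (B)
lemma pvFlat_first (col : String) :
    ∀ L : List (String × List String),
    (((L.flatMap (fun p => p.2.map (fun k => (k, p.1)))).find?
        (fun q => PySem.Str.isIn q.1 col)).map Prod.snd) = pvFirst L col := by
  intro L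
  induction L with
  | nil => simp [pvFirst]
  | cons p rest ih =>
    obtain ⟨cat, kws⟩ := p
    rw [List.flatMap_cons, pvFlat_block, ih]
    rfl

lemma pvDest_eq (col : String) : pvDestB col = pvDest col := by
  have hp : pvPairs = pvCats.flatMap (fun p => p.2.map (fun k => (k, p.1))) := by decide
  rw [pvDestB, hp, pvFlat_first, pvDest]

-- ===== VERDICT (by name: the statement is the Claim_ definition above) =====
theorem categorize_pgs_spec : Claim_equal_categorize_pgs := by
  intro columns _
  unfold Spec_categorize_pgs categorize_pgs categorize_pgs_alt
  dsimp only
  have hinitA : ((PySem.Dict.ofList pvCats).keys.foldl (fun d c => d.insert c ([] : List String)) PySem.Dict.empty).insert "其他" ([] : List String) = pvSkel (fun _ => []) := by decide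
  rw [hinitA, pvALoop columns (fun _ => [])]
  show (pvSkel _).items = _
  have hnames : pvNamesB = pvNames := by decide
  rw [pvSkel, hnames]
  refine List.map_congr_left (fun c _ => ?_)
  refine congrArg (Prod.mk c) ?_
  simp only [List.nil_append]
  exact (List.filter_congr (fun col _ => by rw [pvDest_eq])).symm
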